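-- pv_equiv track=rewrite | github.com/Opsimathy/IT5003 | Finals/IT5003 24S2/IT5003 24S2 Final Code.py | city_14
-- ===== SOURCE A (Python) =====
-- from typing import List, Optional, Tuple
--
-- def city_14(E: List[Tuple[int, int, int]], n: int, k: int) -> int:
--     from collections import defaultdict
--     from heapq import heappush, heappop
--     g = defaultdict(list)
--     for u, v, w in E:
--         g[u].append((v, w))
--         g[v].append((u, w))
--
--     def dijkstra(i):
--         dist = [float('inf')] * n
--         dist[i] = 0
--         q = [(0, i)]
--         while q:
--             d, u = heappop(q)
--             if d > dist[u] or d > k: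
--                 continue
--             for v, w in g[u]:
--                 nd = d + w
--                 if nd < dist[v] and nd <= k:
--                     dist[v] = nd
--                     heappush(q, (nd, v))
--         return dist
--
--     ans, best = -1, -1
--     for i in range(n):
--         d = dijkstra(i)
--         c = sum(i != j and d[j] <= k for j in range(n))
--         if c >= best:
--             ans, best = i, c
--     return ans
-- ===== SOURCE B (Python) =====
-- def city_14(E, n, k):
--     # Bellman-Ford-style relaxation to a fixpoint from each source (no heap,
--     # no adjacency structure): sweep the edge list until no distance improves.
--     best_i, best_c = -1, -1
--     for i in range(n):
--         dist = [None] * n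
--         dist[i] = 0
--         changed = True
--         while changed:
--             changed = False
--             for u, v, w in E:
--                 for a, b in ((u, v), (v, u)):
--                     da = dist[a]
--                     if da is not None:
--                         nd = da + w
--                         if nd <= k and (dist[b] is None or nd < dist[b]):
--                             dist[b] = nd
--                             changed = True
--         c = sum(1 for j in range(n) if j != i and dist[j] is not None)
--         if c >= best_c:
--             best_i, best_c = i, c
--     return best_i
-- ===== Notes on version B (the rewrite author's own statement) =====
-- stated objective: alternative
-- what changed: Replaces the per-source lazy Dijkstra (defaultdict adjacency + binary heap with stale-entry skipping) by per-source Bellman-Ford-style sweeps over the raw edge list repeated until no distance improves; no heap and no adjacency structure are built.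
-- outside the precondition, e.g. on city_14([(-1, 0, 1)], 2, 5): A returns 0, B returns 1; on city_14([(0, 1, -5)], 2, -10): A returns 1, B returns 1
import Mathlib
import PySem

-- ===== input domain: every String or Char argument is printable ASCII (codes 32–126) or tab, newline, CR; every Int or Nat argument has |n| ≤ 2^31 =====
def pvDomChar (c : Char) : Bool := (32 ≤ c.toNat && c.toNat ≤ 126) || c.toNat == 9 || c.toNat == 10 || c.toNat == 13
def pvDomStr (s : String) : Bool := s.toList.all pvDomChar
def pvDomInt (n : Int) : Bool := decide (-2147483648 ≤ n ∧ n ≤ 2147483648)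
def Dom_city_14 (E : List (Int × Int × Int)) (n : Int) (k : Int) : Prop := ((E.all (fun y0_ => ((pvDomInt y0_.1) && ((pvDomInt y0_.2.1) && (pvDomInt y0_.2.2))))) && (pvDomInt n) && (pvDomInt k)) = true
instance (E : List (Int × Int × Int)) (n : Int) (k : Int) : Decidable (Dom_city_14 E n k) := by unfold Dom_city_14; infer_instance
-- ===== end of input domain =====

-- B replaces A's per-source heap Dijkstra by per-source Bellman-Ford-style edge-list
-- sweeps to a fixpoint: a different algorithm of similar size, not claimed faster.
-- ===== PORT A =====
-- Python tuple comparison (d, u) < (d', u') as heapq uses it (lexicographic)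
def pairLt (a b : Int × Int) : Bool := a.1 < b.1 || (a.1 == b.1 && a.2 < b.2)

-- hand port of CPython heapq._siftdown (pure-python reference), exact step for step;
-- the while loop is fuel-recursion with fuel = pos, which the loop can never exhaust
-- (pos strictly decreases), so it is exact.
def hpSiftdownLoop : Nat → List (Int × Int) → Nat → Nat → (Int × Int) → List (Int × Int)
  | 0, heap, _, pos, newitem => heap.set pos newitem
  | f + 1, heap, startpos, pos, newitem =>
    if startpos < pos then
      let parentpos := (pos - 1) / 2      -- (pos-1) >> 1 on a nonnegative index: identical
      let parent := heap.getD parentpos (0, 0)   -- index proven in range under the loop invariant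
      if pairLt newitem parent then
        hpSiftdownLoop f (heap.set pos parent) startpos parentpos newitem
      else heap.set pos newitem
    else heap.set pos newitem

-- hand port of CPython heapq.heappush: heap.append(item); _siftdown(heap, 0, len(heap)-1)
def hpPush (heap : List (Int × Int)) (item : Int × Int) : List (Int × Int) :=
  hpSiftdownLoop heap.length (heap ++ [item]) 0 heap.length item

-- hand port of CPython heapq._siftup's while loop; fuel = len(heap) is never exhausted
-- (pos strictly increases and stays < len), so it is exact. Returns (heap, final pos).
def hpSiftupLoop : Nat → List (Int × Int) → Nat → (Int × Int) → List (Int × Int) × Nat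
  | 0, heap, pos, _ => (heap, pos)
  | f + 1, heap, pos, _newitem =>
    let childpos := 2 * pos + 1
    if childpos < heap.length then
      let rightpos := childpos + 1
      let childpos :=
        if rightpos < heap.length && !(pairLt (heap.getD childpos (0,0)) (heap.getD rightpos (0,0)))
        then rightpos else childpos
      hpSiftupLoop f (heap.set pos (heap.getD childpos (0,0))) childpos _newitem
    else (heap, pos)

-- hand port of CPython heapq._siftup: move the smaller child up, then heap[pos]=newitem
-- and _siftdown(heap, startpos, pos)
def hpSiftup (heap : List (Int × Int)) (pos : Nat) : List (Int × Int) :=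
  let newitem := heap.getD pos (0, 0)
  let hp := hpSiftupLoop heap.length heap pos newitem
  hpSiftdownLoop hp.2 (hp.1.set hp.2 newitem) pos hp.2 newitem

-- hand port of CPython heapq.heappop (called only on a nonempty heap):
-- lastelt = heap.pop(); if heap: returnitem = heap[0]; heap[0] = lastelt; _siftup(heap, 0);
-- return returnitem; return lastelt
def hpPop (heap : List (Int × Int)) : (Int × Int) × List (Int × Int) :=
  let lastelt := heap.getLastD (0, 0)
  let rest := heap.dropLast
  if rest.isEmpty then (lastelt, [])
  else (rest.getD 0 (0, 0), hpSiftup (rest.set 0 lastelt) 0)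

-- g = defaultdict(list); for u,v,w in E: g[u].append((v,w)); g[v].append((u,w))
def buildAdj (E : List (Int × Int × Int)) : PySem.Dict Int (List (Int × Int)) :=
  E.foldl (fun g t =>
    let g1 := g.insert t.1 (g.getD t.1 [] ++ [(t.2.1, t.2.2)])
    g1.insert t.2.1 (g1.getD t.2.1 [] ++ [(t.1, t.2.2)])) PySem.Dict.empty

-- nd < dist[v] with float('inf') represented as none
def oltB (a : Int) : Option Int → Bool
  | none => true
  | some x => decide (a < x)

-- d > dist[u] (false when dist[u] is inf)
def ogtB (d : Int) : Option Int → Bool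
  | none => false
  | some x => decide (x < d)

-- d[j] <= k (false when d[j] is inf)
def oleB : Option Int → Int → Bool
  | none, _ => false
  | some x, k => decide (x ≤ k)

-- the body of "for v, w in g[u]" inside dijkstra
def relaxFoldA (k d : Int) (nbrs : List (Int × Int)) (dist : List (Option Int))
    (q : List (Int × Int)) : List (Option Int) × List (Int × Int) :=
  nbrs.foldl (fun s vw =>
    let nd := d + vw.2
    if oltB nd (s.1.getD vw.1.toNat none) && decide (nd ≤ k) then
      (s.1.set vw.1.toNat (some nd), hpPush s.2 (nd, vw.1))
    else s) (dist, q)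

-- "while q:" of dijkstra; fuel-recursion, fuel never exhausted under Pre_ (see fuelA)
def dijkLoopA (g : PySem.Dict Int (List (Int × Int))) (k : Int) :
    Nat → List (Int × Int) → List (Option Int) → List (Option Int)
  | 0, _, dist => dist
  | f + 1, q, dist =>
    if q.isEmpty then dist
    else
      let pr := hpPop q
      let d := pr.1.1
      let u := pr.1.2
      if ogtB d (dist.getD u.toNat none) || decide (d > k) then dijkLoopA g k f pr.2 dist
      else
        let s := relaxFoldA k d (g.getD u []) dist pr.2
        dijkLoopA g k f s.2 s.1

def fuelA (n k : Int) : Nat := n.toNat * (k.toNat + 1) + 2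

def dijkstraA (g : PySem.Dict Int (List (Int × Int))) (n k i : Int) : List (Option Int) :=
  dijkLoopA g k (fuelA n k) [(0, i)] ((List.replicate n.toNat (none : Option Int)).set i.toNat (some 0))

def city_14 (E : List (Int × Int × Int)) (n : Int) (k : Int) : Int :=
  let g := buildAdj E
  ((PySem.List.pyRange 0 n 1).foldl (fun s i =>
    let d := dijkstraA g n k i
    let c := ((PySem.List.pyRange 0 n 1).map (fun j =>
      if i ≠ j ∧ oleB (d.getD j.toNat none) k = true then (1 : Int) else 0)).sum
    if c ≥ s.2 then (i, c) else s) ((-1 : Int), (-1 : Int))).1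

-- ===== PORT B =====
-- one relaxation attempt a→b with weight w (the inner "for a, b in ((u,v),(v,u))" body)
def relaxB (k : Int) (st : List (Option Int) × Bool) (a b w : Int) : List (Option Int) × Bool :=
  match st.1.getD a.toNat none with
  | none => st
  | some da =>
    let nd := da + w
    if decide (nd ≤ k) && oltB nd (st.1.getD b.toNat none) then (st.1.set b.toNat (some nd), true)
    else st

-- one sweep over the edge list, both directions per edge
def passB (E : List (Int × Int × Int)) (k : Int) (dist : List (Option Int)) :
    List (Option Int) × Bool :=
  E.foldl (fun st t => relaxB k (relaxB k st t.1 t.2.1 t.2.2) t.2.1 t.1 t.2.2) (dist, false)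

-- "while changed:" ; fuel-recursion, fuel never exhausted under Pre_ (see fuelA)
def bfLoopB (E : List (Int × Int × Int)) (k : Int) : Nat → List (Option Int) → List (Option Int)
  | 0, dist => dist
  | f + 1, dist =>
    let st := passB E k dist
    if st.2 then bfLoopB E k f st.1 else st.1

def city_14_alt (E : List (Int × Int × Int)) (n : Int) (k : Int) : Int :=
  ((PySem.List.pyRange 0 n 1).foldl (fun s i =>
    let dist := bfLoopB E k (fuelA n k) ((List.replicate n.toNat (none : Option Int)).set i.toNat (some 0))
    let c := ((PySem.List.pyRange 0 n 1).map (fun j =>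
      if j ≠ i ∧ dist.getD j.toNat none ≠ none then (1 : Int) else 0)).sum
    if c ≥ s.2 then (i, c) else s) ((-1 : Int), (-1 : Int))).1

-- ===== PRECONDITION & SPEC =====
-- When n > 0, Pre_ excludes edge endpoints outside [0, n) — A raises IndexError for
-- them, except negative in-range ones where A's value is an accident of Python's
-- negative-index wraparound meeting its per-node adjacency dict — and negative
-- weights, on which A loops forever whenever the (undirected, hence negative-cycle)
-- edge is relaxable within k.  When n ≤ 0 both programs ignore E and return -1, so
-- every E is admitted.
def Pre_city_14 (E : List (Int × Int × Int)) (n : Int) (k : Int) : Prop :=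
  n ≤ 0 ∨ ∀ t ∈ E, 0 ≤ t.1 ∧ t.1 < n ∧ 0 ≤ t.2.1 ∧ t.2.1 < n ∧ 0 ≤ t.2.2

instance (E : List (Int × Int × Int)) (n : Int) (k : Int) : Decidable (Pre_city_14 E n k) := by
  unfold Pre_city_14; infer_instance

def pvWitness_city_14 : (List (Int × Int × Int)) × Int × Int := ([(0, 1, 2), (1, 2, 2)], 3, 4)

def Spec_city_14 (E : List (Int × Int × Int)) (n : Int) (k : Int) (out : Int) : Prop := out = city_14_alt E n k
instance (E : List (Int × Int × Int)) (n : Int) (k : Int) (out : Int) : Decidable (Spec_city_14 E n k out) := by unfold Spec_city_14; infer_instance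

-- ===== CLAIM (what is proved, stated in full; the proofs are below) =====
def Claim_equal_city_14 : Prop := ∀ (E : List (Int × Int × Int)) (n : Int) (k : Int), Dom_city_14 E n k → Pre_city_14 E n k → Spec_city_14 E n k (city_14 E n k)

-- ===== LEMMAS AND PROOFS =====

-- "x ≤ y" on distances where none plays float('inf')
def ole : Option Int → Option Int → Prop
  | _, none => True
  | none, some _ => False
  | some a, some b => a ≤ b

theorem ole_refl (x : Option Int) : ole x x := by cases x <;> simp [ole]

theorem ole_trans {x y z : Option Int} (h1 : ole x y) (h2 : ole y z) : ole x z := by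
  cases x <;> cases y <;> cases z <;> simp_all [ole] <;> omega

theorem ole_antisymm {x y : Option Int} (h1 : ole x y) (h2 : ole y x) : x = y := by
  cases x <;> cases y <;> simp_all [ole] <;> omega

theorem ole_some_iff {a b : Int} : ole (some a) (some b) ↔ a ≤ b := by simp [ole]

theorem ole_some_right {x : Option Int} {b : Int} (h : ole x (some b)) :
    ∃ a, x = some a ∧ a ≤ b := by cases x <;> simp_all [ole]

-- getD / set on Nat indices
theorem getD_set_self {α : Type} [Inhabited α] (l : List α) (j : Nat) (a d : α) (h : j < l.length) :
    (l.set j a).getD j d = a := by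
  simp [List.getD, List.getElem?_set_self', h]

theorem getD_replicate_lt {α : Type} (n : Nat) (a d : α) (j : Nat) (h : j < n) :
    (List.replicate n a).getD j d = a := by
  simp [List.getD, List.getElem?_replicate, h]

theorem getD_ge_len {α : Type} (l : List α) (j : Nat) (d : α) (h : l.length ≤ j) :
    l.getD j d = d := by
  simp [List.getD, List.getElem?_eq_none_iff.mpr h]

-- multiset facts about the hand-ported heap
theorem count_set {α : Type} [DecidableEq α] (l : List α) :
    ∀ (i : Nat) (a x : α) (h : i < l.length),
    (l.set i a).count x + (if l[i] = x then 1 else 0)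
      = l.count x + (if a = x then 1 else 0) := by
  induction l with
  | nil => intro i a x h; simp at h
  | cons hd tl ih =>
    intro i a x h
    cases i with
    | zero => simp [List.count_cons]; split_ifs <;> omega
    | succ i =>
      have := ih i a x (by simpa using h)
      simp only [List.set_cons_succ, List.count_cons, List.getElem_cons_succ]
      split_ifs at * <;> omega

theorem set_swap_perm {α : Type} [DecidableEq α] (l : List α) (i j : Nat) (a : α)
    (hi : i < l.length) (hj : j < l.length) (hne : i ≠ j) :
    ((l.set i (l[j])).set j a).Perm (l.set i a) := by
  rw [List.perm_iff_count]
  intro x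
  have h1 := count_set l i (l[j]) x hi
  have h2 := count_set (l.set i (l[j])) j a x (by simpa using hj)
  have h3 := count_set l i a x hi
  have e1 : (l.set i (l[j]))[j]'(by simpa using hj) = l[j] :=
    List.getElem_set_ne (by omega) _
  rw [e1] at h2
  split_ifs at h1 h2 h3 <;> omega

theorem siftdownLoop_perm : ∀ (f : Nat) (heap : List (Int × Int)) (sp pos : Nat) (ni : Int × Int),
    pos < heap.length →
    (hpSiftdownLoop f heap sp pos ni).Perm (heap.set pos ni) := by
  intro f
  induction f with
  | zero => intro heap sp pos ni h; simp [hpSiftdownLoop]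
  | succ f ih =>
    intro heap sp pos ni h
    simp only [hpSiftdownLoop]
    by_cases h1 : sp < pos
    · rw [if_pos h1]
      by_cases h2 : pairLt ni (heap.getD ((pos - 1) / 2) (0, 0)) = true
      · rw [if_pos h2]
        have hpp : (pos - 1) / 2 < pos := by omega
        have hppl : (pos - 1) / 2 < heap.length := Nat.lt_trans hpp h
        have hrec := ih (heap.set pos (heap.getD ((pos-1)/2) (0,0))) sp ((pos-1)/2) ni
          (by simpa using hppl)
        have hgd : heap.getD ((pos-1)/2) (0,0) = heap[(pos-1)/2]'hppl :=
          List.getD_eq_getElem _ _ _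
        rw [hgd] at hrec ⊢
        exact hrec.trans (set_swap_perm heap pos ((pos-1)/2) ni h hppl (by omega))
      · rw [if_neg h2]
    · rw [if_neg h1]

theorem hpPush_perm (heap : List (Int × Int)) (item : Int × Int) :
    (hpPush heap item).Perm (item :: heap) := by
  unfold hpPush
  have h1 : heap.length < (heap ++ [item]).length := by simp
  refine (siftdownLoop_perm _ _ _ _ _ h1).trans ?_
  have : (heap ++ [item]).set heap.length item = heap ++ [item] := by
    rw [List.set_append_right _ _ (le_refl _)]
    simp
  rw [this]
  exact List.perm_append_singleton _ _

theorem siftupLoop_spec : ∀ (f : Nat) (heap : List (Int × Int)) (pos : Nat) (ni : Int × Int),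
    pos < heap.length →
    (hpSiftupLoop f heap pos ni).2 < (hpSiftupLoop f heap pos ni).1.length ∧
    (hpSiftupLoop f heap pos ni).1.length = heap.length ∧
    ((hpSiftupLoop f heap pos ni).1.set (hpSiftupLoop f heap pos ni).2 ni).Perm (heap.set pos ni) := by
  intro f
  induction f with
  | zero => intro heap pos ni h; exact ⟨h, rfl, List.Perm.refl _⟩
  | succ f ih =>
    intro heap pos ni h
    simp only [hpSiftupLoop]
    by_cases h1 : 2 * pos + 1 < heap.length
    · rw [if_pos h1]
      set cp := if (2 * pos + 1 + 1 < heap.length &&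
          !pairLt (heap.getD (2 * pos + 1) (0, 0)) (heap.getD (2 * pos + 1 + 1) (0, 0))) = true
        then 2 * pos + 1 + 1 else 2 * pos + 1 with hcp
      have hcpl : cp < heap.length := by
        rw [hcp]; split_ifs with h2
        · exact of_decide_eq_true ((Bool.and_eq_true _ _).mp h2).1
        · exact h1
      have hcpos : pos < cp := by rw [hcp]; split_ifs <;> omega
      have hrec := ih (heap.set pos (heap.getD cp (0,0))) cp ni (by simpa using hcpl)
      refine ⟨hrec.1, by rw [hrec.2.1]; simp, ?_⟩
      have hgd : heap.getD cp (0,0) = heap[cp]'hcpl := List.getD_eq_getElem _ _ _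
      rw [hgd] at hrec ⊢
      exact hrec.2.2.trans (set_swap_perm heap pos cp ni h hcpl (by omega))
    · rw [if_neg h1]
      exact ⟨h, rfl, List.Perm.refl _⟩

theorem hpSiftup_perm (heap : List (Int × Int)) (pos : Nat) (h : pos < heap.length) :
    (hpSiftup heap pos).Perm heap := by
  unfold hpSiftup
  obtain ⟨h1, h2, h3⟩ := siftupLoop_spec heap.length heap pos (heap.getD pos (0,0)) h
  refine (siftdownLoop_perm _ _ _ _ _ (by simpa using h1)).trans ?_
  rw [List.set_set]
  refine h3.trans ?_
  have : heap.set pos (heap.getD pos (0,0)) = heap := by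
    apply List.ext_getElem (by simp)
    intro i hi1 hi2
    by_cases hip : i = pos
    · subst hip; simp [List.getElem_set_self, List.getD, List.getElem?_eq_getElem h]
    · simp [List.getElem_set_ne (by omega : pos ≠ i)]
  rw [this]

theorem hpPop_perm (heap : List (Int × Int)) (h : heap ≠ []) :
    ((hpPop heap).1 :: (hpPop heap).2).Perm heap := by
  unfold hpPop
  have hsplit : heap.dropLast ++ [heap.getLastD (0,0)] = heap := by
    rw [List.getLastD_eq_getLast?, List.getLast?_eq_some_getLast h]
    exact List.dropLast_append_getLast h
  by_cases hre : heap.dropLast.isEmpty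
  · simp only [hre, if_true]
    rw [List.isEmpty_iff] at hre
    rw [hre] at hsplit
    simp only [List.nil_append] at hsplit
    rw [← hsplit]
    exact List.Perm.refl _
  · simp only [hre, if_false]
    rw [List.isEmpty_iff] at hre
    obtain ⟨r0, rt, hrt⟩ := List.exists_cons_of_ne_nil hre
    set last := heap.getLastD (0,0) with hlast
    have hset : heap.dropLast.set 0 last = last :: rt := by rw [hrt]; rfl
    have hlen : 0 < (heap.dropLast.set 0 last).length := by rw [hset]; simp
    have hperm := hpSiftup_perm (heap.dropLast.set 0 last) 0 hlen
    have hget0 : heap.dropLast.getD 0 (0,0) = r0 := by rw [hrt]; rfl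
    rw [hget0]
    have s1 : (r0 :: hpSiftup (heap.dropLast.set 0 last) 0).Perm (r0 :: (last :: rt)) :=
      List.Perm.cons r0 (hperm.trans (by rw [hset]))
    have s2 : (r0 :: (last :: rt)).Perm heap := by
      conv_rhs => rw [← hsplit, hrt]
      exact List.Perm.cons r0 (List.perm_append_singleton _ _).symm
    exact s1.trans s2

-- directed-edge view of the undirected edge list
def Edg (E : List (Int × Int × Int)) (u v w : Int) : Prop := (u, v, w) ∈ E ∨ (v, u, w) ∈ E

-- reference form of A's adjacency lists
def adjL (x : Int) : List (Int × Int × Int) → List (Int × Int)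
  | [] => []
  | t :: ts => ((if t.1 = x then [(t.2.1, t.2.2)] else []) ++
                (if t.2.1 = x then [(t.1, t.2.2)] else [])) ++ adjL x ts

theorem buildAdj_getD (E : List (Int × Int × Int)) (x : Int) :
    (buildAdj E).getD x [] = adjL x E := by
  suffices h : ∀ (g : PySem.Dict Int (List (Int × Int))),
      (E.foldl (fun g t =>
        let g1 := g.insert t.1 (g.getD t.1 [] ++ [(t.2.1, t.2.2)])
        g1.insert t.2.1 (g1.getD t.2.1 [] ++ [(t.1, t.2.2)])) g).getD x []
      = g.getD x [] ++ adjL x E by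
    have := h PySem.Dict.empty
    simpa [buildAdj, adjL] using this
  induction E with
  | nil => intro g; simp [adjL]
  | cons t ts ih =>
    obtain ⟨a, b, c⟩ := t
    intro g
    rw [List.foldl_cons, ih, adjL]
    simp only [PySem.Dict.getD_insert]
    by_cases h1 : a = x <;> by_cases h2 : b = x
    · subst h1; subst h2
      simp [PySem.Dict.getD_insert]
    · subst h1
      have hab : ¬ (a = b) := fun hh => h2 hh.symm
      simp [PySem.Dict.getD_insert, hab, h2]
    · subst h2
      have hba : ¬ (b = a) := fun hh => h1 hh.symm
      simp [PySem.Dict.getD_insert, hba, h1]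
    · have hxa : ¬ (x = a) := fun hh => h1 hh.symm
      have hxb : ¬ (x = b) := fun hh => h2 hh.symm
      simp [PySem.Dict.getD_insert, hxa, hxb, h1, h2]

theorem mem_adjL (x v w : Int) (E : List (Int × Int × Int)) :
    (v, w) ∈ adjL x E ↔ Edg E x v w := by
  induction E with
  | nil => simp [adjL, Edg]
  | cons t ts ih =>
    obtain ⟨a, b, c⟩ := t
    simp only [adjL, List.mem_append, ih, Edg, List.mem_cons]
    by_cases h1 : a = x <;> by_cases h2 : b = x <;>
      simp [h1, h2, Prod.ext_iff] <;> tauto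

-- potential function for termination fuel
def pot (k : Int) : Option Int → Nat
  | none => k.toNat + 1
  | some x => x.toNat

def potSum (k : Int) (l : List (Option Int)) : Nat := (l.map (pot k)).sum

theorem sum_set_nat (l : List Nat) : ∀ (i : Nat) (a : Nat), i < l.length →
    (l.set i a).sum + l.getD i 0 = l.sum + a := by
  induction l with
  | nil => intro i a h; simp at h
  | cons hd tl ih =>
    intro i a h
    cases i with
    | zero => simp [List.getD]; omega
    | succ i =>
      have := ih i a (by simpa using h)
      simp only [List.set_cons_succ, List.sum_cons, List.getD_cons_succ]
      omega

theorem potSum_set (k : Int) (l : List (Option Int)) (j : Nat) (a : Option Int)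
    (h : j < l.length) :
    potSum k (l.set j a) + pot k (l.getD j none) = potSum k l + pot k a := by
  unfold potSum
  rw [List.map_set]
  have h2 : (l.map (pot k)).getD j 0 = pot k (l.getD j none) := by
    rw [List.getD_eq_getElem _ _ (by simpa using h), List.getD_eq_getElem _ _ h]
    simp
  have h3 := sum_set_nat (l.map (pot k)) j (pot k a) (by simpa using h)
  rw [h2] at h3
  omega

theorem potSum_replicate (k : Int) (m : Nat) :
    potSum k (List.replicate m (none : Option Int)) = m * (k.toNat + 1) := by
  unfold potSum
  rw [List.map_replicate, List.sum_replicate]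
  simp [pot, Nat.smul_one_eq_cast]

-- invariants shared by the two loop proofs
def IsFix (E : List (Int × Int × Int)) (k : Int) (dist : List (Option Int)) : Prop :=
  ∀ u v w, Edg E u v w → ∀ du, dist.getD u.toNat none = some du → du + w ≤ k →
    ole (dist.getD v.toNat none) (some (du + w))

def InvD (n k i : Int) (dist : List (Option Int)) : Prop :=
  dist.length = n.toNat ∧
  ∀ (j : Nat) (x : Int), dist.getD j none = some x → 0 ≤ x ∧ (x ≤ k ∨ (j = i.toNat ∧ x = 0))

def InvPhi (φ dist : List (Option Int)) : Prop :=
  ∀ j : Nat, ole (φ.getD j none) (dist.getD j none)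

def InvQ (n : Int) (φ dist : List (Option Int)) (q : List (Int × Int)) : Prop :=
  ∀ e ∈ q, 0 ≤ e.2 ∧ e.2 < n ∧ 0 ≤ e.1 ∧
    ole (dist.getD e.2.toNat none) (some e.1) ∧ ole (φ.getD e.2.toNat none) (some e.1)

def InvW (E : List (Int × Int × Int)) (k : Int) (dist : List (Option Int))
    (q : List (Int × Int)) : Prop :=
  ∀ u v w, Edg E u v w → ∀ du, dist.getD u.toNat none = some du → du + w ≤ k →
    ole (dist.getD v.toNat none) (some (du + w)) ∨ (du, u) ∈ q

theorem edg_bounds {E : List (Int × Int × Int)} {n u v w : Int}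
    (hpre : ∀ t ∈ E, 0 ≤ t.1 ∧ t.1 < n ∧ 0 ≤ t.2.1 ∧ t.2.1 < n ∧ 0 ≤ t.2.2) (h : Edg E u v w) :
    0 ≤ u ∧ u < n ∧ 0 ≤ v ∧ v < n ∧ 0 ≤ w := by
  rcases h with h | h
  · have := hpre _ h; simp at this; tauto
  · have := hpre _ h; simp at this; tauto

theorem oltB_ole {nd : Int} {o : Option Int} (h : oltB nd o = true) : ole (some nd) o := by
  cases o <;> simp_all [oltB, ole] <;> omega

theorem oltB_false_ole {nd : Int} {o : Option Int} (h : oltB nd o = false) :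
    ole o (some nd) := by
  cases o <;> simp_all [oltB, ole]

theorem getD_set_cases (l : List (Option Int)) (t j : Nat) (a : Option Int) :
    (l.set t a).getD j none = if t = j ∧ t < l.length then a else l.getD j none := by
  simp only [List.getD, List.getElem?_set]
  by_cases h1 : t = j
  · subst h1
    by_cases h2 : t < l.length
    · simp [h2]
    · simp only [if_pos rfl, if_neg h2]
      rw [List.getElem?_eq_none (by omega)]
      simp [h2]
  · simp [h1]

theorem set_mono (dist : List (Option Int)) (t : Nat) (nd : Int)
    (h : oltB nd (dist.getD t none) = true) :
    ∀ j : Nat, ole ((dist.set t (some nd)).getD j none) (dist.getD j none) := by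
  intro j
  rw [getD_set_cases]
  split_ifs with h1
  · rw [← h1.1]; exact oltB_ole h
  · exact ole_refl _

-- the inner "for v, w in g[u]" loop of dijkstra preserves all invariants, relaxes
-- every neighbour of u, records every change in the heap, and does not increase
-- the potential
theorem relaxFoldA_spec {E : List (Int × Int × Int)} {n k i : Int} (φl : List (Option Int))
    (hpre : ∀ t ∈ E, 0 ≤ t.1 ∧ t.1 < n ∧ 0 ≤ t.2.1 ∧ t.2.1 < n ∧ 0 ≤ t.2.2) (hφfix : IsFix E k φl) (u d : Int)
    (hun : 0 ≤ u) (hd0 : 0 ≤ d) (hdk : d ≤ k)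
    (hφu : ole (φl.getD u.toNat none) (some d)) :
    ∀ (nbrs : List (Int × Int)) (dist : List (Option Int)) (q : List (Int × Int)),
    (∀ p ∈ nbrs, Edg E u p.1 p.2) →
    InvQ n φl dist q → InvD n k i dist → InvPhi φl dist →
    dist.getD u.toNat none = some d →
    InvQ n φl (relaxFoldA k d nbrs dist q).1 (relaxFoldA k d nbrs dist q).2 ∧
    InvD n k i (relaxFoldA k d nbrs dist q).1 ∧
    InvPhi φl (relaxFoldA k d nbrs dist q).1 ∧
    (relaxFoldA k d nbrs dist q).1.getD u.toNat none = some d ∧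
    (∀ j : Nat, ole ((relaxFoldA k d nbrs dist q).1.getD j none) (dist.getD j none)) ∧
    (∀ e ∈ q, e ∈ (relaxFoldA k d nbrs dist q).2) ∧
    (∀ p ∈ nbrs, ole ((relaxFoldA k d nbrs dist q).1.getD p.1.toNat none) (some (d + p.2)) ∨
      k < d + p.2) ∧
    (∀ (j : Int), 0 ≤ j → ∀ x, (relaxFoldA k d nbrs dist q).1.getD j.toNat none = some x →
      dist.getD j.toNat none = some x ∨ (x, j) ∈ (relaxFoldA k d nbrs dist q).2) ∧
    (relaxFoldA k d nbrs dist q).2.length + potSum k (relaxFoldA k d nbrs dist q).1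
      ≤ q.length + potSum k dist := by
  intro nbrs
  induction nbrs with
  | nil =>
    intro dist q _ hQ hD hP hdu
    exact ⟨hQ, hD, hP, hdu, fun j => ole_refl _, fun e he => he, by simp,
      fun j _ x hx => Or.inl hx, le_refl _⟩
  | cons p t ih =>
    intro dist q hmem hQ hD hP hdu
    have hedgp : Edg E u p.1 p.2 := hmem p (by simp)
    obtain ⟨_, _, hp0, hpn, hw0⟩ := edg_bounds hpre hedgp
    have hcons : ∀ (d1 : List (Option Int)) (q1 : List (Int × Int)),
        relaxFoldA k d (p :: t) d1 q1 =
        relaxFoldA k d t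
          (if (oltB (d + p.2) (d1.getD p.1.toNat none) && decide (d + p.2 ≤ k)) = true
            then d1.set p.1.toNat (some (d + p.2)) else d1)
          (if (oltB (d + p.2) (d1.getD p.1.toNat none) && decide (d + p.2 ≤ k)) = true
            then hpPush q1 (d + p.2, p.1) else q1) := by
      intro d1 q1
      simp only [relaxFoldA, List.foldl_cons]
      congr 1
      cases hgg : (oltB (d + p.2) (d1.getD p.1.toNat none) && decide (d + p.2 ≤ k)) <;>
        simp [hgg]
    by_cases hg : (oltB (d + p.2) (dist.getD p.1.toNat none) && decide (d + p.2 ≤ k)) = true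
    · -- the relaxation fires
      have holt : oltB (d + p.2) (dist.getD p.1.toNat none) = true :=
        ((Bool.and_eq_true _ _).mp hg).1
      have hk : d + p.2 ≤ k := of_decide_eq_true ((Bool.and_eq_true _ _).mp hg).2
      have hrw : relaxFoldA k d (p :: t) dist q =
          relaxFoldA k d t (dist.set p.1.toNat (some (d + p.2))) (hpPush q (d + p.2, p.1)) := by
        rw [hcons dist q, if_pos hg, if_pos hg]

      rw [hrw]
      have hplen : p.1.toNat < dist.length := by rw [hD.1]; omega
      have hget : (dist.set p.1.toNat (some (d + p.2))).getD p.1.toNat none = some (d + p.2) :=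
        getD_set_self _ _ _ _ hplen
      have hφp : ole (φl.getD p.1.toNat none) (some (d + p.2)) := by
        obtain ⟨pu, hpu, hpule⟩ := ole_some_right hφu
        exact ole_trans (hφfix u p.1 p.2 hedgp pu hpu (by omega)) (by rw [ole_some_iff]; omega)
      have hmono1 := set_mono dist p.1.toNat (d + p.2) holt
      have hQ' : InvQ n φl (dist.set p.1.toNat (some (d + p.2))) (hpPush q (d + p.2, p.1)) := by
        intro e he
        rcases List.mem_cons.mp ((hpPush_perm q (d + p.2, p.1)).mem_iff.mp he) with rfl | he'
        · exact ⟨hp0, hpn, by omega, by rw [hget]; exact ole_refl _, hφp⟩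
        · obtain ⟨e1, e2, e3, e4, e5⟩ := hQ e he'
          exact ⟨e1, e2, e3, ole_trans (hmono1 _) e4, e5⟩
      have hD' : InvD n k i (dist.set p.1.toNat (some (d + p.2))) := by
        refine ⟨by simp [hD.1], ?_⟩
        intro j x hx
        rw [getD_set_cases] at hx
        split_ifs at hx with h1
        · cases hx; constructor <;> omega
        · exact hD.2 j x hx
      have hP' : InvPhi φl (dist.set p.1.toNat (some (d + p.2))) := by
        intro j
        rw [getD_set_cases]
        split_ifs with h1
        · rw [← h1.1]; exact hφp
        · exact hP j
      have hdu' : (dist.set p.1.toNat (some (d + p.2))).getD u.toNat none = some d := by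
        rw [getD_set_cases]
        split_ifs with h1
        · exfalso
          have : dist.getD p.1.toNat none = some d := by rw [← h1.1] at hdu; exact hdu
          rw [this] at holt
          simp only [oltB, decide_eq_true_eq] at holt
          omega
        · exact hdu
      obtain ⟨c1, c2, c3, c4, c5, c6, c7, c8, c9⟩ :=
        ih (dist.set p.1.toNat (some (d + p.2))) (hpPush q (d + p.2, p.1))
          (fun x hx => hmem x (by simp [hx])) hQ' hD' hP' hdu'
      have hsub : ∀ e ∈ q, e ∈ hpPush q (d + p.2, p.1) := fun e he =>
        (hpPush_perm q (d + p.2, p.1)).mem_iff.mpr (by simp [he])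
      refine ⟨c1, c2, c3, c4, fun j => ole_trans (c5 j) (hmono1 j), fun e he => c6 _ (hsub e he),
        ?_, ?_, ?_⟩
      · intro p' hp'
        rcases List.mem_cons.mp hp' with heq | hp''
        · have hp1 : p'.1 = p.1 := by rw [heq]
          have hp2 : p'.2 = p.2 := by rw [heq]
          rw [hp1, hp2]
          exact Or.inl (ole_trans (c5 _) (by rw [hget]; exact ole_refl _))
        · exact c7 p' hp''
      · intro j hj0 x hx
        rcases c8 j hj0 x hx with hx' | hx'
        · rw [getD_set_cases] at hx'
          split_ifs at hx' with h1
          · injection hx' with hxe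
            have hj : j = p.1 := by omega
            subst hj
            subst hxe
            exact Or.inr (c6 _ ((hpPush_perm q (d + p.2, p.1)).mem_iff.mpr (by simp)))
          · exact Or.inl hx'
        · exact Or.inr hx'
      · have hqlen : (hpPush q (d + p.2, p.1)).length = q.length + 1 := by
          have := (hpPush_perm q (d + p.2, p.1)).length_eq
          simpa using this
        have hps := potSum_set k dist p.1.toNat (some (d + p.2)) hplen
        have hlt : pot k (some (d + p.2)) < pot k (dist.getD p.1.toNat none) := by
          cases hob : dist.getD p.1.toNat none with
          | none => simp only [pot]; omega
          | some x =>
            have hx0 : 0 ≤ x := (hD.2 p.1.toNat x hob).1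
            rw [hob] at holt
            simp only [oltB, decide_eq_true_eq] at holt
            simp only [pot]; omega
        omega
    · -- guard fails: the state is unchanged
      have hgf := Bool.eq_false_iff.mpr hg
      have hrw : relaxFoldA k d (p :: t) dist q = relaxFoldA k d t dist q := by
        rw [hcons dist q, if_neg (by rw [hgf]; simp), if_neg (by rw [hgf]; simp)]
      rw [hrw]
      obtain ⟨c1, c2, c3, c4, c5, c6, c7, c8, c9⟩ :=
        ih dist q (fun x hx => hmem x (by simp [hx])) hQ hD hP hdu
      refine ⟨c1, c2, c3, c4, c5, c6, ?_, c8, c9⟩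
      intro p' hp'
      rcases List.mem_cons.mp hp' with heq | hp''
      · have hp1 : p'.1 = p.1 := by rw [heq]
        have hp2 : p'.2 = p.2 := by rw [heq]
        rw [hp1, hp2]
        cases ho : oltB (d + p.2) (dist.getD p.1.toNat none) with
        | false => exact Or.inl (ole_trans (c5 _) (oltB_false_ole ho))
        | true =>
          have hdec : decide (d + p.2 ≤ k) = false := by
            cases hdec : decide (d + p.2 ≤ k) with
            | false => rfl
            | true => rw [ho, hdec] at hgf; cases hgf
          exact Or.inr (by simp at hdec; omega)
      · exact c7 p' hp''

-- A's main loop: invariants give a fixpoint, φ-domination and monotonicity at exit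
theorem dijkA_master {E : List (Int × Int × Int)} {n k i : Int} (φl : List (Option Int))
    (hpre : ∀ t ∈ E, 0 ≤ t.1 ∧ t.1 < n ∧ 0 ≤ t.2.1 ∧ t.2.1 < n ∧ 0 ≤ t.2.2) (hφfix : IsFix E k φl) :
    ∀ (f : Nat) (q : List (Int × Int)) (dist : List (Option Int)),
    InvQ n φl dist q → InvD n k i dist → InvPhi φl dist → InvW E k dist q →
    q.length + potSum k dist ≤ f →
    InvD n k i (dijkLoopA (buildAdj E) k f q dist) ∧
    InvPhi φl (dijkLoopA (buildAdj E) k f q dist) ∧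
    IsFix E k (dijkLoopA (buildAdj E) k f q dist) ∧
    (∀ j : Nat, ole ((dijkLoopA (buildAdj E) k f q dist).getD j none) (dist.getD j none)) := by
  intro f
  induction f with
  | zero =>
    intro q dist hQ hD hP hW hfuel
    have hq : q = [] := by
      have : q.length = 0 := by omega
      exact List.length_eq_zero_iff.mp this
    subst hq
    exact ⟨hD, hP, fun u v w he du h1 h2 => (hW u v w he du h1 h2).resolve_right (by simp),
      fun j => ole_refl _⟩
  | succ f ih =>
    intro q dist hQ hD hP hW hfuel
    simp only [dijkLoopA]
    by_cases hqe : q.isEmpty = true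
    · rw [if_pos hqe]
      have hq : q = [] := List.isEmpty_iff.mp hqe
      subst hq
      exact ⟨hD, hP, fun u v w he du h1 h2 => (hW u v w he du h1 h2).resolve_right (by simp),
        fun j => ole_refl _⟩
    · rw [if_neg hqe]
      have hne : q ≠ [] := by simpa [List.isEmpty_iff] using hqe
      have hperm := hpPop_perm q hne
      have hmemq : (hpPop q).1 ∈ q := hperm.mem_iff.mp (by simp)
      obtain ⟨hu0, hun', hd0, hold, hφold⟩ := hQ _ hmemq
      obtain ⟨du0, hdu0, hdu0le⟩ := ole_some_right hold
      have hq'sub : ∀ e ∈ (hpPop q).2, e ∈ q := fun e he =>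
        hperm.mem_iff.mp (by simp [he])
      have hq'len : (hpPop q).2.length + 1 = q.length := by
        have := hperm.length_eq
        simpa using this
      have hqpos : 0 < q.length := List.length_pos_iff.mpr hne
      by_cases hskip :
          (ogtB (hpPop q).1.1 (dist.getD (hpPop q).1.2.toNat none) ||
            decide ((hpPop q).1.1 > k)) = true
      · rw [if_pos hskip]
        have hW' : InvW E k dist (hpPop q).2 := by
          intro u' v w hedg du' hdu' hkw
          rcases hW u' v w hedg du' hdu' hkw with h | h
          · exact Or.inl h
          · rcases List.mem_cons.mp (hperm.mem_iff.symm.mp h) with hhd | htl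
            · exfalso
              have he1 : du' = (hpPop q).1.1 := congrArg Prod.fst hhd
              have he2 : u' = (hpPop q).1.2 := congrArg Prod.snd hhd
              rw [he2] at hdu'
              rw [hdu0] at hdu'
              injection hdu' with he3
              have hw0 : 0 ≤ w := (edg_bounds hpre hedg).2.2.2.2
              rcases Bool.or_eq_true_iff.mp hskip with hh | hh
              · rw [hdu0] at hh
                simp only [ogtB, decide_eq_true_eq] at hh
                omega
              · simp only [decide_eq_true_eq] at hh
                omega
            · exact Or.inr htl
        have := ih (hpPop q).2 dist (fun e he => hQ e (hq'sub e he)) hD hP hW' (by omega)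
        exact this
      · rw [if_neg hskip]
        have hogf : ogtB (hpPop q).1.1 (dist.getD (hpPop q).1.2.toNat none) = false := by
          cases hh : ogtB (hpPop q).1.1 (dist.getD (hpPop q).1.2.toNat none) with
          | false => rfl
          | true => rw [Bool.or_eq_true_iff.mpr (Or.inl hh)] at hskip; exact absurd rfl hskip
        have hdk : ¬ ((hpPop q).1.1 > k) := by
          intro hh
          exact hskip (Bool.or_eq_true_iff.mpr (Or.inr (by simpa using hh)))
        have hdeq : dist.getD (hpPop q).1.2.toNat none = some (hpPop q).1.1 := by
          rw [hdu0] at hogf ⊢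
          simp only [ogtB, decide_eq_false_iff_not] at hogf
          have : du0 = (hpPop q).1.1 := by omega
          rw [this]
        have hadj : (buildAdj E).getD (hpPop q).1.2 [] = adjL (hpPop q).1.2 E :=
          buildAdj_getD E _
        rw [hadj]
        have hn : ∀ p ∈ adjL (hpPop q).1.2 E, Edg E (hpPop q).1.2 p.1 p.2 := by
          intro p hp
          have : (p.1, p.2) ∈ adjL (hpPop q).1.2 E := by simpa using hp
          exact (mem_adjL _ _ _ E).mp this
        obtain ⟨c1, c2, c3, c4, c5, c6, c7, c8, c9⟩ :=
          relaxFoldA_spec (i := i) φl hpre hφfix (hpPop q).1.2 (hpPop q).1.1 hu0 hd0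
            (by omega) hφold (adjL (hpPop q).1.2 E) dist (hpPop q).2 hn
            (fun e he => hQ e (hq'sub e he)) hD hP hdeq
        have hW' : InvW E k
            (relaxFoldA k (hpPop q).1.1 (adjL (hpPop q).1.2 E) dist (hpPop q).2).1
            (relaxFoldA k (hpPop q).1.1 (adjL (hpPop q).1.2 E) dist (hpPop q).2).2 := by
          intro u' v w hedg du' hdu' hkw
          have hu'0 : 0 ≤ u' := (edg_bounds hpre hedg).1
          rcases c8 u' hu'0 du' hdu' with hold' | hin
          · rcases hW u' v w hedg du' hold' hkw with hrel | hq
            · exact Or.inl (ole_trans (c5 v.toNat) hrel)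
            · rcases List.mem_cons.mp (hperm.mem_iff.symm.mp hq) with hhd | htl
              · have he1 : du' = (hpPop q).1.1 := congrArg Prod.fst hhd
                have he2 : u' = (hpPop q).1.2 := congrArg Prod.snd hhd
                have hvw : (v, w) ∈ adjL (hpPop q).1.2 E := by
                  rw [mem_adjL]
                  rw [he2] at hedg
                  exact hedg
                rcases c7 (v, w) hvw with hh | hh
                · rw [he1]
                  exact Or.inl hh
                · exfalso; rw [he1] at hkw; omega
              · exact Or.inr (c6 _ htl)
          · exact Or.inr hin
        have hrec := ih _ _ c1 c2 c3 hW' (by omega)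
        exact ⟨hrec.1, hrec.2.1, hrec.2.2.1,
          fun j => ole_trans (hrec.2.2.2 j) (c5 j)⟩

-- one relaxation attempt of B
theorem relaxB_spec {E : List (Int × Int × Int)} {n k i : Int} (φl : List (Option Int))
    (hpre : ∀ t ∈ E, 0 ≤ t.1 ∧ t.1 < n ∧ 0 ≤ t.2.1 ∧ t.2.1 < n ∧ 0 ≤ t.2.2) (hφfix : IsFix E k φl) (a b w : Int) (hedg : Edg E a b w)
    (st : List (Option Int) × Bool) (hD : InvD n k i st.1) (hP : InvPhi φl st.1) :
    InvD n k i (relaxB k st a b w).1 ∧ InvPhi φl (relaxB k st a b w).1 ∧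
    (∀ j : Nat, ole ((relaxB k st a b w).1.getD j none) (st.1.getD j none)) ∧
    (st.2 = true → (relaxB k st a b w).2 = true) ∧
    (st.2 = false → (relaxB k st a b w).2 = false → (relaxB k st a b w).1 = st.1 ∧
      (∀ da, st.1.getD a.toNat none = some da → da + w ≤ k →
        ole (st.1.getD b.toNat none) (some (da + w)))) ∧
    potSum k (relaxB k st a b w).1 ≤ potSum k st.1 ∧
    (st.2 = false → (relaxB k st a b w).2 = true →
      potSum k (relaxB k st a b w).1 < potSum k st.1) := by
  obtain ⟨ha0, han, hb0, hbn, hw0⟩ := edg_bounds hpre hedg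
  cases hda : st.1.getD a.toNat none with
  | none =>
    have hres : relaxB k st a b w = st := by simp only [relaxB, hda]
    rw [hres]
    refine ⟨hD, hP, fun j => ole_refl _, fun h => h, ?_, le_refl _, by simp⟩
    intro _ _
    exact ⟨rfl, fun da hda' => by simp at hda'⟩
  | some da =>
    have hda0 : 0 ≤ da := (hD.2 a.toNat da hda).1
    by_cases hg : (decide (da + w ≤ k) && oltB (da + w) (st.1.getD b.toNat none)) = true
    · have hk : da + w ≤ k := of_decide_eq_true ((Bool.and_eq_true _ _).mp hg).1
      have holt : oltB (da + w) (st.1.getD b.toNat none) = true :=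
        ((Bool.and_eq_true _ _).mp hg).2
      have hres : relaxB k st a b w = (st.1.set b.toNat (some (da + w)), true) := by
        simp only [relaxB, hda, hg, if_pos]
      rw [hres]
      have hblen : b.toNat < st.1.length := by rw [hD.1]; omega
      have hpot : potSum k (st.1.set b.toNat (some (da + w))) < potSum k st.1 := by
        have hps := potSum_set k st.1 b.toNat (some (da + w)) hblen
        have hlt : pot k (some (da + w)) < pot k (st.1.getD b.toNat none) := by
          cases hob : st.1.getD b.toNat none with
          | none => simp only [pot]; omega
          | some x =>
            have hx0 : 0 ≤ x := (hD.2 b.toNat x hob).1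
            rw [hob] at holt
            simp only [oltB, decide_eq_true_eq] at holt
            simp only [pot]; omega
        omega
      refine ⟨?_, ?_, set_mono st.1 b.toNat (da + w) holt, fun _ => rfl,
        by simp, le_of_lt hpot, fun _ _ => hpot⟩
      · refine ⟨by simp [hD.1], ?_⟩
        intro j x hx
        rw [getD_set_cases] at hx
        split_ifs at hx with h1
        · cases hx; constructor <;> omega
        · exact hD.2 j x hx
      · intro j
        rw [getD_set_cases]
        split_ifs with h1
        · rw [← h1.1]
          obtain ⟨pa, hpa, hpale⟩ := ole_some_right (hda ▸ hP a.toNat)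
          have := hφfix a b w hedg pa hpa (by omega)
          exact ole_trans this (by rw [ole_some_iff]; omega)
        · exact hP j
    · have hgf : (decide (da + w ≤ k) && oltB (da + w) (st.1.getD b.toNat none)) = false :=
        Bool.eq_false_iff.mpr hg
      have hres : relaxB k st a b w = st := by
        simp only [relaxB, hda, hgf, Bool.false_eq_true, ↓reduceIte]
      rw [hres]
      refine ⟨hD, hP, fun j => ole_refl _, fun h => h, ?_, le_refl _, by simp⟩
      intro _ _
      refine ⟨rfl, fun da' hda' hk' => ?_⟩
      injection hda' with hdd
      subst hdd
      rcases Bool.and_eq_false_iff.mp hgf with h | h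
      · exact absurd hk' (by simpa using h)
      · exact oltB_false_ole h

-- one sweep of B over the edge list
theorem passB_spec {E : List (Int × Int × Int)} {n k i : Int} (φl : List (Option Int))
    (hpre : ∀ t ∈ E, 0 ≤ t.1 ∧ t.1 < n ∧ 0 ≤ t.2.1 ∧ t.2.1 < n ∧ 0 ≤ t.2.2) (hφfix : IsFix E k φl)
    (dist : List (Option Int)) (hD : InvD n k i dist) (hP : InvPhi φl dist) :
    InvD n k i (passB E k dist).1 ∧ InvPhi φl (passB E k dist).1 ∧
    (∀ j : Nat, ole ((passB E k dist).1.getD j none) (dist.getD j none)) ∧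
    ((passB E k dist).2 = false → (passB E k dist).1 = dist ∧ IsFix E k dist) ∧
    ((passB E k dist).2 = true → potSum k (passB E k dist).1 < potSum k dist) := by
  have aux : ∀ (l : List (Int × Int × Int)) (st : List (Option Int) × Bool),
      (∀ t ∈ l, t ∈ E) → InvD n k i st.1 → InvPhi φl st.1 →
      InvD n k i (l.foldl (fun st t => relaxB k (relaxB k st t.1 t.2.1 t.2.2) t.2.1 t.1 t.2.2) st).1 ∧
      InvPhi φl (l.foldl (fun st t => relaxB k (relaxB k st t.1 t.2.1 t.2.2) t.2.1 t.1 t.2.2) st).1 ∧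
      (∀ j : Nat, ole ((l.foldl (fun st t => relaxB k (relaxB k st t.1 t.2.1 t.2.2) t.2.1 t.1 t.2.2) st).1.getD j none) (st.1.getD j none)) ∧
      (st.2 = true → (l.foldl (fun st t => relaxB k (relaxB k st t.1 t.2.1 t.2.2) t.2.1 t.1 t.2.2) st).2 = true) ∧
      potSum k (l.foldl (fun st t => relaxB k (relaxB k st t.1 t.2.1 t.2.2) t.2.1 t.1 t.2.2) st).1 ≤ potSum k st.1 ∧
      (st.2 = false → (l.foldl (fun st t => relaxB k (relaxB k st t.1 t.2.1 t.2.2) t.2.1 t.1 t.2.2) st).2 = true →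
        potSum k (l.foldl (fun st t => relaxB k (relaxB k st t.1 t.2.1 t.2.2) t.2.1 t.1 t.2.2) st).1 < potSum k st.1) ∧
      (st.2 = false → (l.foldl (fun st t => relaxB k (relaxB k st t.1 t.2.1 t.2.2) t.2.1 t.1 t.2.2) st).2 = false →
        (l.foldl (fun st t => relaxB k (relaxB k st t.1 t.2.1 t.2.2) t.2.1 t.1 t.2.2) st).1 = st.1 ∧
        ∀ t ∈ l,
          (∀ da, st.1.getD t.1.toNat none = some da → da + t.2.2 ≤ k →
            ole (st.1.getD t.2.1.toNat none) (some (da + t.2.2))) ∧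
          (∀ da, st.1.getD t.2.1.toNat none = some da → da + t.2.2 ≤ k →
            ole (st.1.getD t.1.toNat none) (some (da + t.2.2)))) := by
    intro l
    induction l with
    | nil =>
      intro st _ hD' hP'
      exact ⟨hD', hP', fun j => ole_refl _, fun h => h, le_refl _, by simp, fun _ _ => ⟨rfl, by simp⟩⟩
    | cons t l' ihl =>
      intro st hmem hD' hP'
      have hedg1 : Edg E t.1 t.2.1 t.2.2 := Or.inl (by simpa using hmem t (by simp))
      have hedg2 : Edg E t.2.1 t.1 t.2.2 := Or.inr (by simpa using hmem t (by simp))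
      obtain ⟨a1, a2, a3, a4, a5, a6, a7⟩ :=
        relaxB_spec (i := i) φl hpre hφfix t.1 t.2.1 t.2.2 hedg1 st hD' hP'
      set st1 := relaxB k st t.1 t.2.1 t.2.2 with hst1
      obtain ⟨b1, b2, b3, b4, b5, b6, b7⟩ :=
        relaxB_spec (i := i) φl hpre hφfix t.2.1 t.1 t.2.2 hedg2 st1 a1 a2
      set st2 := relaxB k st1 t.2.1 t.1 t.2.2 with hst2
      obtain ⟨c1, c2, c3, c4, c5, c6, c7⟩ := ihl st2 (fun x hx => hmem x (by simp [hx])) b1 b2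
      rw [List.foldl_cons]
      rw [← hst1, ← hst2]
      refine ⟨c1, c2, fun j => ole_trans (c3 j) (ole_trans (b3 j) (a3 j)), ?_, ?_, ?_, ?_⟩
      · intro h; exact c4 (b4 (a4 h))
      · omega
      · -- strict decrease if the flag flipped somewhere
        intro hst hr
        cases ha : st1.2 with
        | true => have := a7 hst ha; omega
        | false =>
          cases hb : st2.2 with
          | true => have := b7 ha hb; omega
          | false => have := c6 hb hr; omega
      · intro hst hr
        have hb : st2.2 = false := by
          cases hb : st2.2 with
          | true => rw [c4 hb] at hr; cases hr
          | false => rfl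
        have ha : st1.2 = false := by
          cases ha : st1.2 with
          | true => rw [b4 ha] at hb; cases hb
          | false => rfl
        obtain ⟨he1, hg1⟩ := a5 hst ha
        obtain ⟨he2, hg2⟩ := b5 ha hb
        obtain ⟨he3, hg3⟩ := c7 hb hr
        rw [he1] at he2 hg2
        rw [he2] at he3 hg3
        refine ⟨he3, ?_⟩
        intro x hx
        rcases List.mem_cons.mp hx with rfl | hx'
        · exact ⟨hg1, hg2⟩
        · exact (hg3 x hx')
  obtain ⟨c1, c2, c3, c4, c5, c6, c7⟩ := aux E (dist, false) (fun t ht => ht) hD hP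
  refine ⟨c1, c2, c3, ?_, c6 rfl⟩
  intro hfl
  obtain ⟨he, hg⟩ := c7 rfl hfl
  refine ⟨he, ?_⟩
  intro u v w hedg du hdu hk
  rcases hedg with h | h
  · exact (hg _ h).1 du hdu hk
  · exact (hg _ h).2 du hdu hk

-- B's main loop
theorem bfB_master {E : List (Int × Int × Int)} {n k i : Int} (φl : List (Option Int))
    (hpre : ∀ t ∈ E, 0 ≤ t.1 ∧ t.1 < n ∧ 0 ≤ t.2.1 ∧ t.2.1 < n ∧ 0 ≤ t.2.2) (hφfix : IsFix E k φl) :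
    ∀ (f : Nat) (dist : List (Option Int)),
    InvD n k i dist → InvPhi φl dist → potSum k dist < f →
    InvD n k i (bfLoopB E k f dist) ∧ InvPhi φl (bfLoopB E k f dist) ∧
    IsFix E k (bfLoopB E k f dist) ∧
    (∀ j : Nat, ole ((bfLoopB E k f dist).getD j none) (dist.getD j none)) := by
  intro f
  induction f with
  | zero => intro dist _ _ h; omega
  | succ f ih =>
    intro dist hD hP hfuel
    obtain ⟨c1, c2, c3, c4, c5⟩ := passB_spec (i := i) φl hpre hφfix dist hD hP
    simp only [bfLoopB]
    cases hch : (passB E k dist).2 with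
    | false =>
      simp only [Bool.false_eq_true, ↓reduceIte]
      obtain ⟨he, hfix⟩ := c4 hch
      rw [he]
      exact ⟨hD, hP, hfix, fun j => ole_refl _⟩
    | true =>
      simp only [↓reduceIte]
      have := ih (passB E k dist).1 c1 c2 (by have := c5 hch; omega)
      exact ⟨this.1, this.2.1, this.2.2.1, fun j => ole_trans (this.2.2.2 j) (c3 j)⟩

-- the all-zeros table is a fixpoint: it lets the master lemmas run without a
-- previously computed fixpoint
theorem phi0_fix {E : List (Int × Int × Int)} {n k : Int} (hpre : ∀ t ∈ E, 0 ≤ t.1 ∧ t.1 < n ∧ 0 ≤ t.2.1 ∧ t.2.1 < n ∧ 0 ≤ t.2.2) :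
    IsFix E k (List.replicate n.toNat (some (0 : Int))) := by
  intro u v w hedg du hdu hkw
  obtain ⟨hu0, hun, hv0, hvn, hw0⟩ := edg_bounds hpre hedg
  rw [getD_replicate_lt _ _ _ _ (by omega)] at hdu
  injection hdu with hdu'
  rw [getD_replicate_lt _ _ _ _ (by omega), ole_some_iff]
  omega

theorem init_getD {n i : Int} (hi : 0 ≤ i) (hin : i < n) (j : Nat) :
    ((List.replicate n.toNat (none : Option Int)).set i.toNat (some 0)).getD j none
      = if j = i.toNat then some 0 else none := by
  rw [getD_set_cases]
  by_cases h : j = i.toNat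
  · subst h
    rw [if_pos ⟨rfl, by simp; omega⟩, if_pos rfl]
  · rw [if_neg (fun hc => h hc.1.symm), if_neg h]
    rcases Nat.lt_or_ge j n.toNat with hj | hj
    · exact getD_replicate_lt _ _ _ _ hj
    · exact getD_ge_len _ _ _ (by simpa using hj)

theorem phi0_getD {n : Int} (j : Nat) :
    (List.replicate n.toNat (some (0 : Int))).getD j none
      = if j < n.toNat then some 0 else none := by
  split_ifs with h
  · exact getD_replicate_lt _ _ _ _ h
  · exact getD_ge_len _ _ _ (by simpa using h)

-- per-source agreement of the two algorithms, plus the facts needed for the counts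
theorem dist_eq {E : List (Int × Int × Int)} {n k i : Int}
    (hpre : ∀ t ∈ E, 0 ≤ t.1 ∧ t.1 < n ∧ 0 ≤ t.2.1 ∧ t.2.1 < n ∧ 0 ≤ t.2.2) (hi : 0 ≤ i) (hin : i < n) :
    (∀ j : Nat, (dijkstraA (buildAdj E) n k i).getD j none =
      (bfLoopB E k (fuelA n k)
        ((List.replicate n.toNat (none : Option Int)).set i.toNat (some 0))).getD j none) ∧
    InvD n k i (bfLoopB E k (fuelA n k)
      ((List.replicate n.toNat (none : Option Int)).set i.toNat (some 0))) := by
  have hitn : i.toNat < n.toNat := by omega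
  have hD0 : InvD n k i ((List.replicate n.toNat (none : Option Int)).set i.toNat (some 0)) := by
    refine ⟨by simp, ?_⟩
    intro j x hx
    rw [init_getD hi hin] at hx
    split_ifs at hx with h1
    injection hx with hx'; omega
  have hP0 : InvPhi (List.replicate n.toNat (some (0 : Int)))
      ((List.replicate n.toNat (none : Option Int)).set i.toNat (some 0)) := by
    intro j
    rw [init_getD hi hin, phi0_getD]
    split_ifs with h1 h2 h3 <;> simp [ole] <;> omega
  have hQ0 : InvQ n (List.replicate n.toNat (some (0 : Int)))
      ((List.replicate n.toNat (none : Option Int)).set i.toNat (some 0)) [(0, i)] := by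
    intro e he
    rcases List.mem_singleton.mp he with rfl
    refine ⟨hi, hin, le_refl _, ?_, ?_⟩
    · rw [init_getD hi hin, if_pos rfl]; exact ole_refl _
    · rw [phi0_getD, if_pos hitn]; exact ole_refl _
  have hW0 : InvW E k ((List.replicate n.toNat (none : Option Int)).set i.toNat (some 0))
      [(0, i)] := by
    intro u' v w hedg du' hdu' hkw
    rw [init_getD hi hin] at hdu'
    split_ifs at hdu' with h1
    injection hdu' with h2
    have hu'0 : 0 ≤ u' := (edg_bounds hpre hedg).1
    have : u' = i := by omega
    subst this
    subst h2
    exact Or.inr (by simp)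
  have hpots : potSum k ((List.replicate n.toNat (none : Option Int)).set i.toNat (some 0))
      + (k.toNat + 1) = n.toNat * (k.toNat + 1) := by
    have := potSum_set k (List.replicate n.toNat (none : Option Int)) i.toNat (some 0)
      (by simpa using hitn)
    rw [potSum_replicate] at this
    rw [getD_replicate_lt _ _ _ _ hitn] at this
    simpa [pot] using this
  have hfA : 1 + potSum k ((List.replicate n.toNat (none : Option Int)).set i.toNat (some 0))
      ≤ fuelA n k := by unfold fuelA; omega
  have hfB : potSum k ((List.replicate n.toNat (none : Option Int)).set i.toNat (some 0))
      < fuelA n k := by unfold fuelA; omega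
  have hφ0 := phi0_fix (k := k) hpre
  obtain ⟨a1, a2, a3, a4⟩ := dijkA_master (i := i) _ hpre hφ0 (fuelA n k) [(0, i)] _
    hQ0 hD0 hP0 hW0 (by simpa using hfA)
  obtain ⟨b1, b2, b3, b4⟩ := bfB_master (i := i) _ hpre hφ0 (fuelA n k) _ hD0 hP0 hfB
  -- A dominated by B's fixpoint
  have hQ0B : InvQ n (bfLoopB E k (fuelA n k)
      ((List.replicate n.toNat (none : Option Int)).set i.toNat (some 0)))
      ((List.replicate n.toNat (none : Option Int)).set i.toNat (some 0)) [(0, i)] := by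
    intro e he
    rcases List.mem_singleton.mp he with rfl
    refine ⟨hi, hin, le_refl _, ?_, ?_⟩
    · rw [init_getD hi hin, if_pos rfl]; exact ole_refl _
    · have := b4 i.toNat
      rw [init_getD hi hin, if_pos rfl] at this
      exact this
  obtain ⟨_, a2', _, _⟩ := dijkA_master (i := i) _ hpre b3 (fuelA n k) [(0, i)] _
    hQ0B hD0 b4 hW0 (by simpa using hfA)
  obtain ⟨_, b2', _, _⟩ := bfB_master (i := i) _ hpre a3 (fuelA n k) _ hD0 a4 hfB
  refine ⟨?_, b1⟩
  intro j
  exact ole_antisymm (b2' j) (a2' j)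

theorem oleB_iff {o : Option Int} {k : Int} :
    oleB o k = true ↔ ∃ x, o = some x ∧ x ≤ k := by
  cases o <;> simp [oleB]

-- ===== VERDICT (by name: the statement is the Claim_ definition above) =====
theorem city_14_spec : Claim_equal_city_14 := by
  unfold Claim_equal_city_14
  intro E n k hdom hpre
  unfold Spec_city_14
  show city_14 E n k = city_14_alt E n k
  rcases hpre with hn | hpre
  · simp only [city_14, city_14_alt]
    rw [PySem.List.pyRange_one_eq_nil hn]
    rfl
  simp only [city_14, city_14_alt]
  congr 1
  apply PySem.List.foldl_congr_mem
  intro acc x hx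
  obtain ⟨hx0, hxn⟩ := (PySem.List.mem_pyRange_one).mp hx
  obtain ⟨hde, hDB⟩ := dist_eq (k := k) hpre hx0 hxn
  have hc : ((PySem.List.pyRange 0 n 1).map (fun j =>
      if x ≠ j ∧ oleB ((dijkstraA (buildAdj E) n k x).getD j.toNat none) k = true
      then (1 : Int) else 0)).sum =
      ((PySem.List.pyRange 0 n 1).map (fun j =>
      if j ≠ x ∧ (bfLoopB E k (fuelA n k)
        ((List.replicate n.toNat (none : Option Int)).set x.toNat (some 0))).getD j.toNat none ≠ none
      then (1 : Int) else 0)).sum := by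
    congr 1
    apply List.map_congr_left
    intro j hj
    obtain ⟨hj0, hjn⟩ := (PySem.List.mem_pyRange_one).mp hj
    apply if_congr _ rfl rfl
    rw [hde j.toNat]
    constructor
    · rintro ⟨hne, hle⟩
      obtain ⟨y, hy, hyk⟩ := oleB_iff.mp hle
      exact ⟨fun h => hne h.symm, by rw [hy]; simp⟩
    · rintro ⟨hne, hsome⟩
      cases hob : (bfLoopB E k (fuelA n k)
          ((List.replicate n.toNat (none : Option Int)).set x.toNat (some 0))).getD j.toNat none with
      | none => exact absurd hob hsome
      | some y =>
        refine ⟨fun h => hne h.symm, ?_⟩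
        have hyk : y ≤ k := by
          rcases (hDB.2 j.toNat y hob).2 with h | h
          · exact h
          · exfalso; omega
        rw [oleB_iff]
        exact ⟨y, rfl, hyk⟩
  rw [hc]
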